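-- pv_equiv track=rewrite | github.com/zengzenghe/Git_NewsPlaceExtract | extractPlace/main_evaluate.py | dictSort
-- ===== SOURCE A (Python) =====
-- def dictSort(input_dict):
--     ret = dict()
--     for code, cnt in input_dict.items():
--         if cnt not in ret.keys():
--             lst = []
--             lst.append(code)
--             ret[cnt] = lst
--         else:
--             ret[cnt].append(code)
--     return sorted(ret.items(), key=lambda x: x[0], reverse=True)
-- ===== SOURCE B (Python) =====
-- def dictSort(input_dict):
--     items = sorted(input_dict.items(), key=lambda kv: kv[1], reverse=True)
--     res = []
--     i = 0
--     n = len(items)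
--     while i < n:
--         cnt = items[i][1]
--         j = i + 1
--         while j < n and items[j][1] == cnt:
--             j += 1
--         res.append((cnt, [code for code, _ in items[i:j]]))
--         i = j
--     return res
-- ===== Notes on version B (the rewrite author's own statement) =====
-- stated objective: idiomatic
-- what changed: Replaces A's value-keyed dict accumulation followed by a sort of the groups with a single stable sort of the items by value descending followed by one adjacent-run grouping pass.
import Mathlib
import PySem

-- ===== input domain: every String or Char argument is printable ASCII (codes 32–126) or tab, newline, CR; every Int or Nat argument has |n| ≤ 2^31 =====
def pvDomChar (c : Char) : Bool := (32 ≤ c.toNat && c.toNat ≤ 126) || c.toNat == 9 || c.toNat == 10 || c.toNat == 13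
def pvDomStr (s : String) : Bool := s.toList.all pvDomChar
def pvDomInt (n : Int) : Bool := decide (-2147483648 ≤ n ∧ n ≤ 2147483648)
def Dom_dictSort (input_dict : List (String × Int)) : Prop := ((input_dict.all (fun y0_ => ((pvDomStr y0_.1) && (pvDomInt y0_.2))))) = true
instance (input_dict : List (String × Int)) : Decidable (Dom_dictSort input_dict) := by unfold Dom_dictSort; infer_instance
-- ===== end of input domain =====

-- B groups by a single stable sort of the items (value-descending) followed by one adjacent-grouping
-- pass, instead of A's value-keyed dict build followed by a sort of the groups.

-- ===== PORT A =====
-- ret = dict(); for code, cnt in input_dict.items():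
--   if cnt not in ret.keys(): ret[cnt] = [code]  else: ret[cnt].append(code)
-- return sorted(ret.items(), key=lambda x: x[0], reverse=True)
def dictSort (input_dict : List (String × Int)) : List (Int × List String) :=
  let ret : PySem.Dict Int (List String) :=
    input_dict.foldl (fun ret p =>
      if ret.contains p.2 = false then ret.insert p.2 [p.1]
      else ret.modify p.2 [] (fun l => l ++ [p.1])) PySem.Dict.empty
  PySem.List.sorted ret.items (fun x => x.1) true

-- ===== PORT B =====
-- the outer/inner while loops of Source B: peel off the leading run of items sharing the head's value
def pyGroupAdj : List (String × Int) → List (Int × List String)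
  | [] => []
  | q :: rest =>
      (q.2, q.1 :: (rest.takeWhile (fun p => p.2 == q.2)).map (fun p => p.1)) ::
        pyGroupAdj (rest.dropWhile (fun p => p.2 == q.2))
  termination_by l => l.length
  decreasing_by
    have := List.length_dropWhile_le (fun p => p.2 == q.2) rest
    simp only [List.length_cons]
    omega

-- items = sorted(input_dict.items(), key=lambda kv: kv[1], reverse=True); then group adjacent runs
def dictSort_alt (input_dict : List (String × Int)) : List (Int × List String) :=
  pyGroupAdj (PySem.List.sorted input_dict (fun kv => kv.2) true)

-- ===== PRECONDITION & SPEC =====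
def Spec_dictSort (input_dict : List (String × Int)) (out : List (Int × List String)) : Prop := out = dictSort_alt input_dict
instance (input_dict : List (String × Int)) (out : List (Int × List String)) : Decidable (Spec_dictSort input_dict out) := by unfold Spec_dictSort; infer_instance

-- ===== CLAIM (what is proved, stated in full; the proofs are below) =====
def Claim_equal_dictSort : Prop := ∀ (input_dict : List (String × Int)), Dom_dictSort input_dict → Spec_dictSort input_dict (dictSort input_dict)

-- ===== LEMMAS AND PROOFS =====

-- the group of a value v: the items carrying v, in input order
def grp (xs : List (String × Int)) (v : Int) : List (String × Int) :=
  xs.filter (fun p => p.2 == v)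

-- the distinct values, sorted descending
def vals (xs : List (String × Int)) : List Int :=
  PySem.List.sorted (PySem.Set.ofList (xs.map (fun p => p.2))) (fun v => v) true

-- the common canonical form both ports are proved equal to
def canon (xs : List (String × Int)) : List (Int × List String) :=
  (vals xs).map (fun v => (v, (grp xs v).map (fun p => p.1)))

lemma snd_of_mem_grp {xs : List (String × Int)} {v : Int} {p : String × Int}
    (h : p ∈ grp xs v) : p.2 = v := by
  have := List.of_mem_filter h
  simpa using this

lemma mem_vals_iff (xs : List (String × Int)) (v : Int) :
    v ∈ vals xs ↔ v ∈ xs.map (fun p => p.2) := by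
  unfold vals
  simp [PySem.List.mem_sorted, PySem.Set.mem_ofList]

lemma vals_nodup (xs : List (String × Int)) : (vals xs).Nodup :=
  (PySem.List.sorted_perm _ _ _).nodup_iff.mpr (PySem.Set.nodup_ofList _)

lemma vals_pairwise_gt (xs : List (String × Int)) :
    (vals xs).Pairwise (fun a b => b < a) := by
  have h1 : (vals xs).Pairwise (fun a b => b ≤ a) :=
    PySem.List.sorted_pairwise_rev _ _
  have h2 : (vals xs).Pairwise (fun a b => a ≠ b) := vals_nodup xs
  exact (h1.and h2).imp (fun h => lt_of_le_of_ne h.1 (Ne.symm h.2))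

lemma vals_perm (xs : List (String × Int)) :
    (vals xs).Perm (PySem.Set.ofList (xs.map (fun p => p.2))) :=
  PySem.List.sorted_perm _ _ _

-- ---- side A: the dict loop builds the groups keyed by value, in first-appearance order ----

lemma stepA_eq (d : PySem.Dict Int (List String)) (p : String × Int) :
    (if d.contains p.2 = false then d.insert p.2 [p.1]
     else d.modify p.2 [] (fun l => l ++ [p.1])) = d.modify p.2 [] (fun l => l ++ [p.1]) := by
  by_cases h : d.contains p.2 = false
  · rw [if_pos h]
    rw [PySem.Dict.modify, PySem.Dict.getD_of_not_contains _ _ h]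
    rfl
  · rw [if_neg h]

lemma retA_items (xs : List (String × Int)) :
    (xs.foldl (fun ret p =>
      if ret.contains p.2 = false then ret.insert p.2 [p.1]
      else ret.modify p.2 [] (fun l => l ++ [p.1])) PySem.Dict.empty).items
    = (PySem.Set.ofList (xs.map (fun p => p.2))).map
        (fun v => (v, (grp xs v).map (fun p => p.1))) := by
  have h1 : (xs.foldl (fun ret p =>
      if ret.contains p.2 = false then ret.insert p.2 [p.1]
      else ret.modify p.2 [] (fun l => l ++ [p.1])) PySem.Dict.empty)
      = xs.foldl (fun d p => d.modify p.2 [] (fun l => l ++ [p.1])) PySem.Dict.empty :=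
    PySem.List.foldl_congr_mem _ _ _ _ (fun acc x _ => stepA_eq acc x)
  rw [h1]
  have hkeys : (xs.foldl (fun d p => d.modify p.2 [] (fun l => l ++ [p.1])) PySem.Dict.empty).keys
      = PySem.Set.ofList (xs.map (fun p => p.2)) := by
    have := PySem.Dict.keys_foldl_modify_key (l := xs) (key := fun p => p.2) (d0 := ([] : List String))
      (f := fun _ p l => l ++ [p.1]) (d := PySem.Dict.empty)
    simpa [PySem.Dict.keys_empty] using this
  have hnd : (xs.foldl (fun d p => d.modify p.2 [] (fun l => l ++ [p.1])) PySem.Dict.empty).keys.Nodup := by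
    rw [hkeys]; exact PySem.Set.nodup_ofList _
  have hgetD : ∀ v : Int,
      (xs.foldl (fun d p => d.modify p.2 [] (fun l => l ++ [p.1])) PySem.Dict.empty).getD v []
      = (grp xs v).map (fun p => p.1) := by
    intro v
    have hfm : (xs.foldl (fun d p => d.modify p.2 [] (fun l => l ++ [p.1])) PySem.Dict.empty)
        = ((xs.map (fun p => (p.2, p.1))).foldl (fun d q => d.modify q.1 [] (fun l => l ++ [q.2])) PySem.Dict.empty) := by
      rw [List.foldl_map]
    rw [hfm, PySem.Dict.getD_foldl_modify_append]
    simp [grp, List.filter_map, Function.comp_def]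
  rw [PySem.Dict.items_eq_map_keys _ hnd [], hkeys]
  exact List.map_congr_left (fun v _ => by rw [hgetD])

lemma portA_eq_canon (xs : List (String × Int)) : dictSort xs = canon xs := by
  unfold dictSort
  simp only []
  show PySem.List.sorted _ (fun x : Int × List String => x.1) true = _
  rw [retA_items]
  unfold canon
  refine PySem.List.sorted_rev_eq_of_perm_of_pairwise_gt _ _ _ ?_ ?_
  · exact (vals_perm xs).map _
  · rw [List.pairwise_map]
    exact vals_pairwise_gt xs

-- ---- side B: the stable sort is the concatenation of the groups in descending value order ----

lemma pairwise_insertBy (x : String × Int) (ys : List (String × Int))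
    (h : ys.Pairwise (fun a b => b.2 ≤ a.2)) :
    (PySem.List.insertBy (fun a b => decide (b.2 < a.2)) x ys).Pairwise (fun a b => b.2 ≤ a.2) := by
  induction ys with
  | nil => simp [PySem.List.insertBy]
  | cons y ys ih =>
    rw [List.pairwise_cons] at h
    by_cases hb : y.2 < x.2
    · simp only [PySem.List.insertBy, hb, decide_true]
      refine List.pairwise_cons.mpr ⟨?_, List.pairwise_cons.mpr h⟩
      intro z hz
      rcases List.mem_cons.mp hz with rfl | hz
      · exact le_of_lt hb
      · exact le_trans (h.1 z hz) (le_of_lt hb)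
    · have : (decide (y.2 < x.2)) = false := by simpa using hb
      simp only [PySem.List.insertBy, this, Bool.false_eq_true, if_false]
      refine List.pairwise_cons.mpr ⟨?_, ih h.2⟩
      intro z hz
      rcases (PySem.List.mem_insertBy _ _ _ _).mp hz with rfl | hz
      · exact le_of_not_gt hb
      · exact h.1 z hz

lemma filter_insertBy (v : Int) (x : String × Int) (ys : List (String × Int))
    (h : ys.Pairwise (fun a b => b.2 ≤ a.2)) :
    (PySem.List.insertBy (fun a b => decide (b.2 < a.2)) x ys).filter (fun p => p.2 == v)
    = if x.2 == v then ys.filter (fun p => p.2 == v) ++ [x]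
      else ys.filter (fun p => p.2 == v) := by
  induction ys with
  | nil => by_cases hx : x.2 = v <;> simp [PySem.List.insertBy, hx]
  | cons y ys ih =>
    rw [List.pairwise_cons] at h
    by_cases hb : y.2 < x.2
    · simp only [PySem.List.insertBy, hb, decide_true]
      by_cases hx : x.2 = v
      · -- y.2 < v, and everything in ys is ≤ y.2 < v : filter (y :: ys) is empty
        have hy : (y.2 == v) = false := by simp; omega
        have hys : ys.filter (fun p => p.2 == v) = [] := by
          rw [List.filter_eq_nil_iff]
          intro z hz
          have := h.1 z hz
          simp; omega
        simp [hx, hy, hys]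
      · simp [List.filter_cons, hx]
    · have hd : (decide (y.2 < x.2)) = false := by simpa using hb
      simp only [PySem.List.insertBy, hd, Bool.false_eq_true, if_false]
      rw [List.filter_cons, List.filter_cons, ih h.2]
      by_cases hx : x.2 = v <;> by_cases hy : (y.2 == v) <;> simp [hx, hy]

lemma foldl_insertBy_facts (xs : List (String × Int)) :
    ∀ (acc : List (String × Int)), acc.Pairwise (fun a b => b.2 ≤ a.2) →
      (xs.foldl (fun acc x => PySem.List.insertBy (fun a b => decide (b.2 < a.2)) x acc) acc).Pairwise
        (fun a b => b.2 ≤ a.2) ∧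
      ∀ v : Int,
        (xs.foldl (fun acc x => PySem.List.insertBy (fun a b => decide (b.2 < a.2)) x acc) acc).filter
          (fun p => p.2 == v)
        = acc.filter (fun p => p.2 == v) ++ grp xs v := by
  induction xs with
  | nil => intro acc h; exact ⟨h, fun v => by simp [grp]⟩
  | cons x xs ih =>
    intro acc h
    have h1 := pairwise_insertBy x acc h
    obtain ⟨hp, hf⟩ := ih _ h1
    refine ⟨hp, fun v => ?_⟩
    rw [List.foldl_cons] at *
    rw [hf v, filter_insertBy v x acc h]
    by_cases hx : x.2 = v
    · simp [grp, hx]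
    · have : (x.2 == v) = false := by simpa using hx
      simp [grp, this]

-- stability of the sort: the items carrying value v stay in input order
lemma filter_sorted_rev (xs : List (String × Int)) (v : Int) :
    (PySem.List.sorted xs (fun kv => kv.2) true).filter (fun p => p.2 == v) = grp xs v := by
  rw [PySem.List.sorted_rev_eq_foldl_insertBy]
  simpa using (foldl_insertBy_facts xs [] (by simp)).2 v

-- two value-descending lists with the same per-value items are equal
lemma eq_of_pairwise_filter :
    ∀ (ys zs : List (String × Int)),
      ys.Pairwise (fun a b => b.2 ≤ a.2) → zs.Pairwise (fun a b => b.2 ≤ a.2) →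
      (∀ v : Int, ys.filter (fun p => p.2 == v) = zs.filter (fun p => p.2 == v)) → ys = zs := by
  intro ys
  induction ys with
  | nil =>
    intro zs _ _ hfilt
    cases zs with
    | nil => rfl
    | cons z zs =>
      have := hfilt z.2
      simp at this
  | cons y ys ih =>
    intro zs hy hz hfilt
    cases zs with
    | nil =>
      have := hfilt y.2
      simp at this
    | cons z zs =>
      rw [List.pairwise_cons] at hy hz
      have hkey : y.2 = z.2 := by
        by_contra hne
        rcases lt_or_gt_of_ne hne with hlt | hgt
        · -- y.2 < z.2 : at value z.2 the right filter starts with z, the left one is empty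
          have h1 := hfilt z.2
          have hyf : (y.2 == z.2) = false := by simp; omega
          have hysf : ys.filter (fun p => p.2 == z.2) = [] := by
            rw [List.filter_eq_nil_iff]; intro p hp
            have := hy.1 p hp; simp; omega
          simp [hyf, hysf] at h1
        · have h1 := hfilt y.2
          have hzf : (z.2 == y.2) = false := by simp; omega
          have hzsf : zs.filter (fun p => p.2 == y.2) = [] := by
            rw [List.filter_eq_nil_iff]; intro p hp
            have := hz.1 p hp; simp; omega
          simp [hzf, hzsf] at h1
      have h1 := hfilt y.2
      have hz2 : (z.2 == y.2) = true := by simp [hkey]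
      simp only [List.filter_cons, beq_self_eq_true, hz2, if_true, List.cons.injEq] at h1
      obtain ⟨rfl, htail⟩ := h1
      congr 1
      apply ih zs hy.2 hz.2
      intro v
      by_cases hv : v = y.2
      · subst hv; exact htail
      · have h2 := hfilt v
        have hyv : (y.2 == v) = false := by simp; exact fun h => hv h.symm
        simp only [List.filter_cons, hyv, Bool.false_eq_true, if_false] at h2
        exact h2

lemma grp_ne_nil_of_mem_vals {xs : List (String × Int)} {v : Int} (h : v ∈ vals xs) :
    grp xs v ≠ [] := by
  rw [mem_vals_iff] at h
  obtain ⟨p, hp, hv⟩ := List.mem_map.mp h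
  intro hnil
  have : p ∈ grp xs v := List.mem_filter.mpr ⟨hp, by simp [hv]⟩
  simp [hnil] at this

lemma grp_eq_nil_of_not_mem_vals {xs : List (String × Int)} {v : Int} (h : v ∉ vals xs) :
    grp xs v = [] := by
  rw [mem_vals_iff] at h
  unfold grp
  rw [List.filter_eq_nil_iff]
  intro p hp
  simp only [beq_iff_eq]
  intro hv
  exact h (List.mem_map.mpr ⟨p, hp, hv⟩)

lemma flatMap_filter_grp (xs : List (String × Int)) (v : Int) :
    ∀ (l : List Int), l.Nodup →
      l.flatMap (fun u => (grp xs u).filter (fun p => p.2 == v))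
      = if v ∈ l then grp xs v else [] := by
  have hone : ∀ u : Int, (grp xs u).filter (fun p => p.2 == v) = if u = v then grp xs v else [] := by
    intro u
    by_cases huv : u = v
    · subst huv
      rw [if_pos rfl, List.filter_eq_self.mpr]
      intro p hp; simp [snd_of_mem_grp hp]
    · rw [if_neg huv, List.filter_eq_nil_iff]
      intro p hp
      simp [snd_of_mem_grp hp, huv]
  intro l
  induction l with
  | nil => simp
  | cons u l ih =>
    intro hnd
    rw [List.nodup_cons] at hnd
    rw [List.flatMap_cons, hone u, ih hnd.2]
    by_cases huv : u = v
    · subst huv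
      simp [hnd.1]
    · simp [huv, Ne.symm huv]

lemma filter_flat (xs : List (String × Int)) (v : Int) :
    ((vals xs).flatMap (grp xs)).filter (fun p => p.2 == v) = grp xs v := by
  rw [List.filter_flatMap, flatMap_filter_grp xs v _ (vals_nodup xs)]
  by_cases hv : v ∈ vals xs
  · rw [if_pos hv]
  · rw [if_neg hv, grp_eq_nil_of_not_mem_vals hv]

lemma flat_pairwise (xs : List (String × Int)) :
    ((vals xs).flatMap (grp xs)).Pairwise (fun a b => b.2 ≤ a.2) := by
  rw [List.pairwise_flatMap]
  constructor
  · intro v _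
    refine List.pairwise_of_forall_mem_list ?_
    intro a ha b hb
    rw [snd_of_mem_grp ha, snd_of_mem_grp hb]
  · refine (vals_pairwise_gt xs).imp ?_
    intro a b hab p hp q hq
    rw [snd_of_mem_grp hp, snd_of_mem_grp hq]
    exact le_of_lt hab

lemma sorted_eq_flatMap (xs : List (String × Int)) :
    PySem.List.sorted xs (fun kv => kv.2) true = (vals xs).flatMap (grp xs) := by
  refine eq_of_pairwise_filter _ _ (PySem.List.sorted_pairwise_rev _ _) (flat_pairwise xs) ?_
  intro v
  rw [filter_sorted_rev, filter_flat]

lemma snd_of_mem_flatMap {xs : List (String × Int)} {l : List Int} {p : String × Int}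
    (h : p ∈ l.flatMap (grp xs)) : p.2 ∈ l := by
  obtain ⟨u, hu, hp⟩ := List.mem_flatMap.mp h
  rw [snd_of_mem_grp hp]; exact hu

lemma groupAdj_flatMap (xs : List (String × Int)) :
    ∀ (l : List Int), l.Nodup → (∀ v ∈ l, grp xs v ≠ []) →
      pyGroupAdj (l.flatMap (grp xs)) = l.map (fun v => (v, (grp xs v).map (fun p => p.1))) := by
  intro l
  induction l with
  | nil => intro _ _; simp [pyGroupAdj]
  | cons v l ih =>
    intro hnd hne
    rw [List.nodup_cons] at hnd
    obtain ⟨q, t, hqt⟩ : ∃ q t, grp xs v = q :: t := by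
      cases hgv : grp xs v with
      | nil => exact absurd hgv (hne v (by simp))
      | cons q t => exact ⟨q, t, rfl⟩
    have hq2 : q.2 = v := snd_of_mem_grp (by rw [hqt]; simp)
    have ht : ∀ p ∈ t, (p.2 == q.2) = true := by
      intro p hp
      have : p ∈ grp xs v := by rw [hqt]; simp [hp]
      simp [snd_of_mem_grp this, hq2]
    have hrest : ∀ p ∈ l.flatMap (grp xs), (p.2 == q.2) = false := by
      intro p hp
      have := snd_of_mem_flatMap hp
      simp only [beq_eq_false_iff_ne, ne_eq, hq2]
      intro he; rw [he] at this; exact hnd.1 this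
    rw [List.flatMap_cons, hqt, List.cons_append]
    rw [pyGroupAdj]
    have htake : (t ++ l.flatMap (grp xs)).takeWhile (fun p => p.2 == q.2) = t := by
      rw [List.takeWhile_append, List.takeWhile_eq_self_iff.mpr ht, if_pos rfl]
      cases hr : l.flatMap (grp xs) with
      | nil => simp
      | cons r rs =>
        rw [List.takeWhile_cons_of_neg]
        · simp
        · simp [hrest r (by rw [hr]; simp)]
    have hdrop : (t ++ l.flatMap (grp xs)).dropWhile (fun p => p.2 == q.2) = l.flatMap (grp xs) := by
      rw [List.dropWhile_append, List.dropWhile_eq_nil_iff.mpr (fun p hp => ht p hp)]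
      simp only [List.isEmpty_nil, if_pos]
      cases hr : l.flatMap (grp xs) with
      | nil => simp
      | cons r rs =>
        rw [List.dropWhile_cons_of_neg]
        simp [hrest r (by rw [hr]; simp)]
    rw [htake, hdrop, ih hnd.2 (fun u hu => hne u (by simp [hu]))]
    rw [List.map_cons, hq2, hqt]
    simp

lemma portB_eq_canon (xs : List (String × Int)) : dictSort_alt xs = canon xs := by
  unfold dictSort_alt canon
  rw [sorted_eq_flatMap]
  exact groupAdj_flatMap xs (vals xs) (vals_nodup xs) (fun v hv => grp_ne_nil_of_mem_vals hv)

-- ===== VERDICT (by name: the statement is the Claim_ definition above) =====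
theorem dictSort_spec : Claim_equal_dictSort := by
  intro xs _
  unfold Spec_dictSort
  rw [portA_eq_canon, portB_eq_canon]
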